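-- pv_equiv track=rewrite | github.com/5lk/hackeurope2026 | engine/parsing.py | _find_string_end
-- ===== SOURCE A (Python) =====
-- def _find_string_end(text: str, start: int) -> int:
--     """Find the end of a JSON string value starting at `start` (after opening quote)."""
--     i = start
--     while i < len(text):
--         ch = text[i]
--         if ch == '\\':
--             i += 2
--             continue
--         if ch == '"':
--             return i
--         i += 1
--     return len(text)
-- ===== SOURCE B (Python) =====
-- def _find_string_end(text: str, start: int) -> int:
--     """Find the end of a JSON string value starting at `start` (after opening quote).
--
--     Skip-scan: jump between interesting positions with str.find instead of
--     stepping one character at a time."""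
--     n = len(text)
--     i = start
--     while True:
--         q = text.find('"', i)
--         if q == -1:
--             return n
--         b = text.find('\\', i)
--         if b != -1 and b < q:
--             i = b + 2
--         else:
--             return q
-- ===== Notes on version B (the rewrite author's own statement) =====
-- stated objective: faster
-- what changed: Replaced the per-character while-loop with a skip-scan that jumps between the next quote and next backslash located by C-level str.find, skipping escapes in blocks instead of inspecting every character in Python.
-- outside the precondition, e.g. on _find_string_end('a"', -1): A returns -1, B returns 1
import Mathlib
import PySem

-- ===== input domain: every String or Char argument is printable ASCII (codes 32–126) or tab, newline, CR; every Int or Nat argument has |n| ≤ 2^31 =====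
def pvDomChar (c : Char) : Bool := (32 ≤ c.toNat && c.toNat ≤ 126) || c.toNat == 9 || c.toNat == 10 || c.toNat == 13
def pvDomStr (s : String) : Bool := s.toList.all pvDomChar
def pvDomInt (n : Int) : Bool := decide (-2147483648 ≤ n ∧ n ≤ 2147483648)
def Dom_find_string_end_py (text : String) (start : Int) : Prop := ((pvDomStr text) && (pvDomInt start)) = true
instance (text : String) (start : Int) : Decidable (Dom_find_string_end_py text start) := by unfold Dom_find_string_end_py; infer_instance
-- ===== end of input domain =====

-- B replaces A's per-character scan with a skip-scan that jumps between the next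
-- quote / next backslash located by str.find (same result; measurably faster in Python).


-- ===== PORT A =====
-- while i < len(text): inspect text[i]; '\\' -> i += 2; '"' -> return i; else i += 1
-- (fuel = an upper bound on the remaining iterations, so the while-loop is structural)
def aLoop (cs : List Char) (fuel : Nat) (i : Int) : Int :=
  if i < (cs.length : Int) then
    match PySem.List.pyGet? cs i with
    | none => 0         -- IndexError in Python (negative index below -len); excluded by Pre_
    | some ch =>
      if ch = '\\' then
        match fuel with
        | 0 => 0          -- never reached: fuel bounds the iteration count
        | fuel' + 1 => aLoop cs fuel' (i + 2)
      else if ch = '"' then i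
      else
        match fuel with
        | 0 => 0          -- never reached
        | fuel' + 1 => aLoop cs fuel' (i + 1)
  else (cs.length : Int)
termination_by structural fuel

def find_string_end_py (text : String) (start : Int) : Int :=
  aLoop text.toList ((text.toList.length : Int) - start).toNat start

-- ===== PORT B =====
-- while True: q = text.find('"', i); if q == -1: return n;
--             b = text.find('\\', i); if b != -1 and b < q: i = b + 2 else: return q
-- (fuel = an upper bound on the remaining iterations, so the while-loop is structural)
def altLoop (cs : List Char) (fuel : Nat) (i : Int) : Int :=
  let q := PySem.Chars.findFrom cs ['"'] i none
  if q = -1 then (cs.length : Int)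
  else
    let b := PySem.Chars.findFrom cs ['\\'] i none
    if b ≠ -1 ∧ b < q then
      match fuel with
      | 0 => 0            -- never reached: fuel bounds the iteration count
      | fuel' + 1 => altLoop cs fuel' (b + 2)
    else q
termination_by structural fuel

def find_string_end_py_alt (text : String) (start : Int) : Int :=
  altLoop text.toList ((text.toList.length : Int) + 2 - start).toNat start

-- ===== PRECONDITION & SPEC =====
-- Pre_ excludes negative start unless the text contains no quote and no backslash
-- (there both programs provably return len(text)): below -len A raises IndexError, and
-- otherwise in [-len, -1] A's value comes from Python's negative-index wraparound (it
-- can even return a negative "end index"), a corner outside the function's natural domain.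
def Pre_find_string_end_py (text : String) (start : Int) : Prop :=
  0 ≤ start ∨ (-(text.toList.length : Int) ≤ start ∧ '"' ∉ text.toList ∧ '\\' ∉ text.toList)
instance (text : String) (start : Int) : Decidable (Pre_find_string_end_py text start) := by unfold Pre_find_string_end_py; infer_instance

def pvWitness_find_string_end_py : String × Int := ("ab\\\"c\"", 0)

def Spec_find_string_end_py (text : String) (start : Int) (out : Int) : Prop := out = find_string_end_py_alt text start
instance (text : String) (start : Int) (out : Int) : Decidable (Spec_find_string_end_py text start out) := by unfold Spec_find_string_end_py; infer_instance

-- ===== CLAIM (what is proved, stated in full; the proofs are below) =====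
def Claim_equal_find_string_end_py : Prop := ∀ (text : String) (start : Int), Dom_find_string_end_py text start → Pre_find_string_end_py text start → Spec_find_string_end_py text start (find_string_end_py text start)

-- ===== LEMMAS AND PROOFS =====

theorem singleton_prefix_iff (c : Char) (l : List Char) : [c] <+: l ↔ l.head? = some c := by
  cases l with
  | nil => simp
  | cons a t => simp [List.cons_prefix_cons, eq_comm]

theorem singleton_infix_iff (c : Char) (l : List Char) : [c] <:+: l ↔ c ∈ l := by
  constructor
  · intro h; exact h.mem (List.mem_singleton_self c)
  · intro h
    obtain ⟨l1, l2, rfl⟩ := List.append_of_mem h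
    exact ⟨l1, l2, by simp⟩

theorem drop_head? (l : List Char) (j : Nat) : (l.drop j).head? = l[j]? := by
  rw [List.head?_eq_getElem?, List.getElem?_drop]; simp

theorem singleton_prefix_drop_iff (c : Char) (l : List Char) (j : Nat) :
    [c] <+: l.drop j ↔ l[j]? = some c := by
  rw [singleton_prefix_iff, drop_head?]

theorem find_char_eq (l : List Char) (c : Char) (j : Nat)
    (hj : l[j]? = some c) (hmin : ∀ m < j, l[m]? ≠ some c) :
    PySem.Chars.find l [c] = (j : Int) := by
  have hmem : c ∈ l := List.mem_of_getElem? hj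
  have hne : PySem.Chars.find l [c] ≠ -1 := by
    rw [Ne, PySem.Chars.find_eq_neg_one_iff, singleton_infix_iff]; simpa using hmem
  have h0 : 0 ≤ PySem.Chars.find l [c] := by
    have := PySem.Chars.neg_one_le_find l [c]; omega
  obtain ⟨hpre, hlow⟩ := PySem.Chars.find_spec (s := l) (sub := [c]) h0
  rw [singleton_prefix_drop_iff] at hpre
  have h1 : ¬ (PySem.Chars.find l [c]).toNat < j := by
    intro hlt; exact hmin _ hlt hpre
  have h2 : ¬ j < (PySem.Chars.find l [c]).toNat := by
    intro hlt
    exact hlow j hlt ((singleton_prefix_drop_iff c l j).mpr hj)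
  omega

theorem find_char_neg (l : List Char) (c : Char) (h : c ∉ l) :
    PySem.Chars.find l [c] = -1 := by
  rw [PySem.Chars.find_eq_neg_one_iff, singleton_infix_iff]; exact h

theorem findFrom_ge (s : List Char) (c : Char) (i : Int) (h : (s.length : Int) ≤ i) :
    PySem.Chars.findFrom s [c] i none = -1 := by
  rw [PySem.Chars.findFrom]
  have hi0 : ¬ i < 0 := by omega
  simp only [hi0, if_false]
  split
  · rfl
  · rename_i hes
    have : i = (s.length : Int) := by omega
    rw [this]
    have : List.drop ((s.length : Int)).toNat (List.take ((s.length : Int)).toNat s) = [] := by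
      simp
    rw [this, find_char_neg _ _ (List.not_mem_nil)]
    simp

theorem findFrom_self (s : List Char) (c : Char) (k : Nat)
    (hk : k < s.length) (hc : s[k]? = some c) :
    PySem.Chars.findFrom s [c] (k : Int) none = (k : Int) := by
  rw [PySem.Chars.findFrom_natCast s [c] k (le_of_lt hk)]
  have : PySem.Chars.find (List.drop k s) [c] = ((0 : Nat) : Int) := by
    apply find_char_eq
    · rw [List.getElem?_drop]; simpa using hc
    · omega
  rw [this]; norm_num

theorem findFrom_step (s : List Char) (c : Char) (k : Nat)
    (hk : k < s.length) (hc : s[k]? ≠ some c) :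
    PySem.Chars.findFrom s [c] (k : Int) none = PySem.Chars.findFrom s [c] ((k : Int) + 1) none := by
  have hk1 : k + 1 ≤ s.length := hk
  have hcast : ((k : Int) + 1) = ((k + 1 : Nat) : Int) := by push_cast; ring
  rw [PySem.Chars.findFrom_natCast s [c] k (le_of_lt hk), hcast,
      PySem.Chars.findFrom_natCast s [c] (k + 1) hk1]
  have hgk : s[k]? = some s[k] := List.getElem?_eq_getElem hk
  have hkc : s[k] ≠ c := by intro h; exact hc (by rw [hgk, h])
  by_cases hmem : c ∈ List.drop (k + 1) s
  · -- found in the tail: finds are offset by one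
    have hne : PySem.Chars.find (List.drop (k + 1) s) [c] ≠ -1 := by
      rw [Ne, PySem.Chars.find_eq_neg_one_iff, singleton_infix_iff]; simpa using hmem
    have h0 : 0 ≤ PySem.Chars.find (List.drop (k + 1) s) [c] := by
      have := PySem.Chars.neg_one_le_find (List.drop (k + 1) s) [c]; omega
    obtain ⟨hpre, hlow⟩ := PySem.Chars.find_spec (s := List.drop (k + 1) s) (sub := [c]) h0
    rw [singleton_prefix_drop_iff] at hpre
    set j : Nat := (PySem.Chars.find (List.drop (k + 1) s) [c]).toNat with hjdef
    have hfind : PySem.Chars.find (List.drop k s) [c] = ((j + 1 : Nat) : Int) := by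
      apply find_char_eq
      · rw [List.getElem?_drop]
        rw [List.getElem?_drop] at hpre
        have : k + (j + 1) = k + 1 + j := by omega
        rw [this]; exact hpre
      · intro m hm
        rcases Nat.eq_zero_or_pos m with hm0 | hmpos
        · subst hm0
          rw [List.getElem?_drop, Nat.add_zero, hgk]
          intro h
          exact hkc (Option.some.inj h)
        · obtain ⟨m', rfl⟩ : ∃ m', m = m' + 1 := ⟨m - 1, by omega⟩
          have hm' : m' < j := by omega
          have h3 := hlow m' hm'
          rw [singleton_prefix_drop_iff, List.getElem?_drop] at h3
          rw [List.getElem?_drop]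
          simpa [show k + (m' + 1) = k + 1 + m' from by omega] using h3
    have hjint : PySem.Chars.find (List.drop (k + 1) s) [c] = (j : Int) := by omega
    have hne1 : ¬(((j + 1 : Nat) : Int) = -1) := by omega
    have hne2 : ¬(((j : Nat) : Int) = -1) := by omega
    rw [hfind, hjint, if_neg hne1, if_neg hne2]
    push_cast
    ring
  · -- not found at all
    have hnot : c ∉ List.drop k s := by
      rw [List.drop_eq_getElem_cons hk, List.mem_cons]
      rintro (h | h)
      · exact hkc h.symm
      · exact hmem h
    rw [find_char_neg _ _ hnot, find_char_neg _ _ hmem]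
    simp

theorem findFrom_none_mono (s : List Char) (c : Char) (k j : Nat)
    (hk : k ≤ s.length) (hkj : k ≤ j)
    (h : PySem.Chars.findFrom s [c] (k : Int) none = -1) :
    PySem.Chars.findFrom s [c] (j : Int) none = -1 := by
  by_cases hj : s.length ≤ j
  · exact findFrom_ge s c j (by exact_mod_cast hj)
  · push_neg at hj
    rw [PySem.Chars.findFrom_natCast_eq_neg_one_iff s [c] k hk] at h
    rw [PySem.Chars.findFrom_natCast_eq_neg_one_iff s [c] j (le_of_lt hj)]
    intro hinf
    apply h
    have : List.drop j s = List.drop (k + (j - k)) s := by congr 1; omega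
    rw [this, ← List.drop_drop] at hinf
    exact hinf.trans (List.drop_suffix _ _).isInfix

theorem findFrom_found (s : List Char) (c : Char) (k : Nat)
    (hk : k ≤ s.length) (h : PySem.Chars.findFrom s [c] (k : Int) none ≠ -1) :
    (k : Int) ≤ PySem.Chars.findFrom s [c] (k : Int) none ∧
      s[(PySem.Chars.findFrom s [c] (k : Int) none).toNat]? = some c := by
  obtain ⟨h1, h2, _⟩ := PySem.Chars.findFrom_natCast_spec s [c] k hk h
  exact ⟨h1, (singleton_prefix_drop_iff c s _).mp h2⟩

theorem altLoop_skip (cs : List Char) (k : Nat) (f : Nat) (hk : k < cs.length)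
    (hc : cs[k]? = some '\\') :
    altLoop cs (f + 1) (k : Int) = altLoop cs f ((k : Int) + 2) := by
  have hb : PySem.Chars.findFrom cs ['\\'] (k : Int) none = (k : Int) :=
    findFrom_self cs '\\' k hk hc
  by_cases hq : PySem.Chars.findFrom cs ['"'] (k : Int) none = -1
  · have hq2 : PySem.Chars.findFrom cs ['"'] ((k : Int) + 2) none = -1 := by
      have h := findFrom_none_mono cs '"' k (k + 2) (le_of_lt hk) (by omega) hq
      push_cast at h
      exact h
    rw [altLoop.eq_def, altLoop.eq_def]
    simp [hq, hq2]
  · obtain ⟨hle, hget⟩ := findFrom_found cs '"' k (le_of_lt hk) hq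
    have hlt : (k : Int) < PySem.Chars.findFrom cs ['"'] (k : Int) none := by
      rcases lt_or_eq_of_le hle with h | h
      · exact h
      · exfalso
        rw [← h, Int.toNat_natCast, hc] at hget
        exact absurd (Option.some.inj hget) (by decide)
    conv_lhs => rw [altLoop.eq_def]
    simp only [hq, if_false, hb]
    rw [if_pos ⟨by omega, hlt⟩]

theorem altLoop_step1 (cs : List Char) (k : Nat) (f : Nat) (hk : k < cs.length) (ch : Char)
    (hc : cs[k]? = some ch) (h1 : ch ≠ '\\') (h2 : ch ≠ '"') :
    altLoop cs f (k : Int) = altLoop cs f ((k : Int) + 1) := by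
  have hq : PySem.Chars.findFrom cs ['"'] (k : Int) none
      = PySem.Chars.findFrom cs ['"'] ((k : Int) + 1) none :=
    findFrom_step cs '"' k hk (by rw [hc]; intro h; exact h2 (Option.some.inj h))
  have hb : PySem.Chars.findFrom cs ['\\'] (k : Int) none
      = PySem.Chars.findFrom cs ['\\'] ((k : Int) + 1) none :=
    findFrom_step cs '\\' k hk (by rw [hc]; intro h; exact h1 (Option.some.inj h))
  conv_lhs => rw [altLoop.eq_def]
  conv_rhs => rw [altLoop.eq_def]
  rw [hq, hb]

theorem end_case (cs : List Char) (k : Nat) (fa fb : Nat) (hk : cs.length ≤ k) :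
    aLoop cs fa (k : Int) = altLoop cs fb (k : Int) := by
  rw [aLoop.eq_def, altLoop.eq_def]
  have h1 : ¬ ((k : Int) < (cs.length : Int)) := by exact_mod_cast not_lt.mpr hk
  have h2 : PySem.Chars.findFrom cs ['"'] (k : Int) none = -1 :=
    findFrom_ge cs '"' k (by exact_mod_cast hk)
  simp [h1, h2]

theorem main_loop_eq (cs : List Char) :
    ∀ (n k fa fb : Nat), cs.length - k ≤ n → cs.length - k ≤ fa →
      cs.length + 2 - k ≤ fb → aLoop cs fa (k : Int) = altLoop cs fb (k : Int) := by
  intro n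
  induction n with
  | zero =>
    intro k fa fb hk _ _
    exact end_case cs k fa fb (by omega)
  | succ n ih =>
    intro k fa fb hk hfa hfb
    by_cases hge : cs.length ≤ k
    · exact end_case cs k fa fb hge
    · push_neg at hge
      have hgk : cs[k]? = some cs[k] := List.getElem?_eq_getElem hge
      obtain ⟨fa', rfl⟩ : ∃ fa', fa = fa' + 1 := ⟨fa - 1, by omega⟩
      obtain ⟨fb', rfl⟩ : ∃ fb', fb = fb' + 1 := ⟨fb - 1, by omega⟩
      conv_lhs => rw [aLoop.eq_def]
      have hlt : ((k : Int) < (cs.length : Int)) := by exact_mod_cast hge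
      rw [if_pos hlt, PySem.List.pyGet?_natCast, hgk]
      show (if cs[k] = '\\' then aLoop cs fa' ((k : Int) + 2)
            else if cs[k] = '"' then (k : Int)
            else aLoop cs fa' ((k : Int) + 1)) = altLoop cs (fb' + 1) (k : Int)
      by_cases hbs : cs[k] = '\\'
      · rw [if_pos hbs]
        have hcast : (k : Int) + 2 = ((k + 2 : Nat) : Int) := by push_cast; ring
        rw [altLoop_skip cs k fb' hge (by rw [hgk, hbs]), hcast]
        exact ih (k + 2) fa' fb' (by omega) (by omega) (by omega)
      · rw [if_neg hbs]
        by_cases hq : cs[k] = '"'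
        · rw [if_pos hq, altLoop.eq_def]
          have hqf : PySem.Chars.findFrom cs ['"'] (k : Int) none = (k : Int) :=
            findFrom_self cs '"' k hge (by rw [hgk, hq])
          have hqne : ((k : Int)) ≠ -1 := by omega
          rw [hqf, if_neg hqne]
          by_cases hb : PySem.Chars.findFrom cs ['\\'] (k : Int) none = -1
          · rw [if_neg (by simp [hb])]
          · obtain ⟨hble, hbget⟩ := findFrom_found cs '\\' k (le_of_lt hge) hb
            have hbne : PySem.Chars.findFrom cs ['\\'] (k : Int) none ≠ (k : Int) := by
              intro heq
              rw [heq] at hbget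
              simp only [Int.toNat_natCast] at hbget
              rw [hgk] at hbget
              exact hbs (Option.some.inj hbget)
            rw [if_neg (by intro hcon; omega)]
        · rw [if_neg hq]
          have hcast : (k : Int) + 1 = ((k + 1 : Nat) : Int) := by push_cast; ring
          rw [altLoop_step1 cs k (fb' + 1) hge cs[k] hgk hbs hq, hcast]
          exact ih (k + 1) fa' (fb' + 1) (by omega) (by omega) (by omega)

theorem findFrom_not_mem (s : List Char) (c : Char) (h : c ∉ s) (i : Int) :
    PySem.Chars.findFrom s [c] i none = -1 := by
  by_contra hne
  set F := PySem.Chars.findFrom s [c] i none with hF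
  rw [PySem.Chars.findFrom] at hF
  dsimp only at hF
  repeat' split at hF
  all_goals try exact hne hF
  all_goals
    rename_i hr
    have hinf := (not_iff_not.mpr (PySem.Chars.find_eq_neg_one_iff _ [c])).mp hr
    push_neg at hinf
    have hmem := (singleton_infix_iff c _).mp hinf
    exact h (List.mem_of_mem_take (List.mem_of_mem_drop hmem))

theorem altLoop_no_quote (cs : List Char) (hq : '"' ∉ cs) (fb : Nat) (i : Int) :
    altLoop cs fb i = (cs.length : Int) := by
  rw [altLoop.eq_def]
  simp [findFrom_not_mem cs '"' hq i]

theorem aLoop_no_special (cs : List Char) (hq : '"' ∉ cs) (hb : '\\' ∉ cs) :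
    ∀ (n fa : Nat) (i : Int), -(cs.length : Int) ≤ i →
      ((cs.length : Int) - i).toNat ≤ n → ((cs.length : Int) - i).toNat ≤ fa →
        aLoop cs fa i = (cs.length : Int) := by
  intro n
  induction n with
  | zero =>
    intro fa i _ hn _
    rw [aLoop.eq_def, if_neg (by omega)]
  | succ n ih =>
    intro fa i hge hn hfa
    by_cases hi : i < (cs.length : Int)
    · have hnone : PySem.List.pyGet? cs i ≠ none := by
        rw [Ne, PySem.List.pyGet?_eq_none_iff]
        simp only [PySem.Raise.InRange]
        omega
      obtain ⟨ch, hch⟩ := Option.ne_none_iff_exists'.mp hnone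
      have hmem : ch ∈ cs := PySem.List.mem_of_pyGet?_eq_some _ hch
      have hc1 : ch ≠ '\\' := fun h => hb (h ▸ hmem)
      have hc2 : ch ≠ '"' := fun h => hq (h ▸ hmem)
      obtain ⟨fa', rfl⟩ : ∃ fa', fa = fa' + 1 := ⟨fa - 1, by omega⟩
      rw [aLoop.eq_def, if_pos hi, hch]
      show (if ch = '\\' then aLoop cs fa' (i + 2)
            else if ch = '"' then i
            else aLoop cs fa' (i + 1)) = (cs.length : Int)
      rw [if_neg hc1, if_neg hc2]
      exact ih fa' (i + 1) (by omega) (by omega) (by omega)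
    · rw [aLoop.eq_def, if_neg hi]

-- ===== VERDICT (by name: the statement is the Claim_ definition above) =====
theorem find_string_end_py_spec : Claim_equal_find_string_end_py := by
  intro text start _ hpre
  unfold Spec_find_string_end_py find_string_end_py find_string_end_py_alt
  unfold Pre_find_string_end_py at hpre
  rcases hpre with hpos | ⟨hge, hq, hb⟩
  · have hk : start = ((start.toNat : Nat) : Int) := by omega
    rw [hk]
    exact main_loop_eq text.toList (text.toList.length - start.toNat) start.toNat
      ((text.toList.length : Int) - ((start.toNat : Nat) : Int)).toNat
      ((text.toList.length : Int) + 2 - ((start.toNat : Nat) : Int)).toNat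
      (le_refl _) (by omega) (by omega)
  · rw [aLoop_no_special text.toList hq hb ((text.toList.length : Int) - start).toNat
        ((text.toList.length : Int) - start).toNat start hge (le_refl _) (le_refl _),
      altLoop_no_quote text.toList hq]
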